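-- pv_equiv track=rewrite | github.com/josephkwok986/CAD_TabPFN | s4_make_splits.py | enforce_strong_disjoint
-- ===== SOURCE A (Python) =====
-- def enforce_strong_disjoint(train_ids, calib_ids, test_ids, part_to_group):
--     """
--     检查强组是否被拆跨侧。
--     """
--     def groups_for(ids):
--         return set(part_to_group.get(x) for x in ids if x in part_to_group)
--     g_train = groups_for(train_ids)
--     g_calib = groups_for(calib_ids)
--     g_test  = groups_for(test_ids)
--     if (g_train & g_calib) or (g_train & g_test) or (g_calib & g_test):
--         return False
--     return True
-- ===== SOURCE B (Python) =====
-- def enforce_strong_disjoint(train_ids, calib_ids, test_ids, part_to_group):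
--     """Single fused pass: remember the first split each group appears in;
--     a group seen again under a different split label is a conflict -> False."""
--     first_side = {}
--     for side, ids in (("train", train_ids), ("calib", calib_ids), ("test", test_ids)):
--         for x in ids:
--             if x not in part_to_group:
--                 continue
--             g = part_to_group[x]
--             prev = first_side.get(g)
--             if prev is None:
--                 first_side[g] = side
--             elif prev != side:
--                 return False
--     return True
-- ===== Notes on version B (the rewrite author's own statement) =====
-- stated objective: alternative
-- what changed: Replaces the three set builds plus three pairwise set intersections with one fused pass over train/calib/test that maintains a single group-to-first-split dict and returns False as soon as a group is seen under a second split.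
import Mathlib
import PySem

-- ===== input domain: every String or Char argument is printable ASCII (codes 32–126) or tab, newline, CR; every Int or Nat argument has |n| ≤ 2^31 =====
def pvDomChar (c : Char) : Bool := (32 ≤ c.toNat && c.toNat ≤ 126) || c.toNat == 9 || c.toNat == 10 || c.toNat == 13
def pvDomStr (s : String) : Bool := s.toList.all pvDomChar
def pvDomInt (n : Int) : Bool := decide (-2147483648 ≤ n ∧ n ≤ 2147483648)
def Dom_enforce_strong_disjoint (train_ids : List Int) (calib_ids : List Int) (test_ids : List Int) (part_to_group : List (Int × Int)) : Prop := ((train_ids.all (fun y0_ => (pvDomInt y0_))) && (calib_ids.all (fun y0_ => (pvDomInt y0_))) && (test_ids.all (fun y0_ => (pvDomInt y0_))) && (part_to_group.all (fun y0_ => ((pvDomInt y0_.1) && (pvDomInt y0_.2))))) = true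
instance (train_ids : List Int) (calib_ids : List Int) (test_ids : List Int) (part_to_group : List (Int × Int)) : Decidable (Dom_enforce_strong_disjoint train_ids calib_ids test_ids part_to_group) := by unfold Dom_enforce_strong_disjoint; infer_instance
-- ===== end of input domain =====

-- ===== PORT A =====
-- B replaces A's three set builds + pairwise intersections with one fused pass
-- keeping a group -> first-split dict and an early exit (objective: alternative).
-- helper for A: set(part_to_group.get(x) for x in ids if x in part_to_group)
def esdGroupsFor (p2g : PySem.Dict Int Int) (ids : List Int) : PySem.Set Int :=
  ids.foldl (fun s x =>
    match p2g.get? x with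
    | some g => PySem.Set.add s g
    | none => s) PySem.Set.empty

def enforce_strong_disjoint (train_ids : List Int) (calib_ids : List Int) (test_ids : List Int) (part_to_group : List (Int × Int)) : Bool :=
  let p2g := PySem.Dict.ofList part_to_group
  let g_train := esdGroupsFor p2g train_ids
  let g_calib := esdGroupsFor p2g calib_ids
  let g_test := esdGroupsFor p2g test_ids
  if !(PySem.Set.inter g_train g_calib).isEmpty ||
     !(PySem.Set.inter g_train g_test).isEmpty ||
     !(PySem.Set.inter g_calib g_test).isEmpty then
    false
  else
    true

-- ===== PORT B =====
-- one side's inner loop of B: none = early `return False`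
def esdScan (p2g : PySem.Dict Int Int) (side : String) : List Int → PySem.Dict Int String → Option (PySem.Dict Int String)
  | [], first_side => some first_side
  | x :: rest, first_side =>
    match p2g.get? x with
    | none => esdScan p2g side rest first_side
    | some g =>
      match first_side.get? g with
      | none => esdScan p2g side rest (first_side.insert g side)
      | some prev => if prev ≠ side then none else esdScan p2g side rest first_side

def enforce_strong_disjoint_alt (train_ids : List Int) (calib_ids : List Int) (test_ids : List Int) (part_to_group : List (Int × Int)) : Bool :=
  let p2g := PySem.Dict.ofList part_to_group
  match esdScan p2g "train" train_ids PySem.Dict.empty with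
  | none => false
  | some d1 =>
    match esdScan p2g "calib" calib_ids d1 with
    | none => false
    | some d2 =>
      match esdScan p2g "test" test_ids d2 with
      | none => false
      | some _ => true

-- ===== PRECONDITION & SPEC =====
def Spec_enforce_strong_disjoint (train_ids : List Int) (calib_ids : List Int) (test_ids : List Int) (part_to_group : List (Int × Int)) (out : Bool) : Prop := out = enforce_strong_disjoint_alt train_ids calib_ids test_ids part_to_group
instance (train_ids : List Int) (calib_ids : List Int) (test_ids : List Int) (part_to_group : List (Int × Int)) (out : Bool) : Decidable (Spec_enforce_strong_disjoint train_ids calib_ids test_ids part_to_group out) := by unfold Spec_enforce_strong_disjoint; infer_instance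

-- ===== CLAIM (what is proved, stated in full; the proofs are below) =====
def Claim_equal_enforce_strong_disjoint : Prop := ∀ (train_ids : List Int) (calib_ids : List Int) (test_ids : List Int) (part_to_group : List (Int × Int)), Dom_enforce_strong_disjoint train_ids calib_ids test_ids part_to_group → Spec_enforce_strong_disjoint train_ids calib_ids test_ids part_to_group (enforce_strong_disjoint train_ids calib_ids test_ids part_to_group)

-- ===== LEMMAS AND PROOFS =====

-- "group g occurs among the groups of ids"
def esdGF (p2g : PySem.Dict Int Int) (ids : List Int) (g : Int) : Prop :=
  ∃ x ∈ ids, p2g.get? x = some g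

lemma esdGF_nil (p2g : PySem.Dict Int Int) (g : Int) : ¬ esdGF p2g [] g := by
  rintro ⟨x, hx, _⟩; exact absurd hx (List.not_mem_nil)

lemma esdGF_cons (p2g : PySem.Dict Int Int) (x : Int) (rest : List Int) (g : Int) :
    esdGF p2g (x :: rest) g ↔ p2g.get? x = some g ∨ esdGF p2g rest g := by
  constructor
  · rintro ⟨y, hy, hg⟩
    rcases List.mem_cons.mp hy with h | h
    · exact Or.inl (h ▸ hg)
    · exact Or.inr ⟨y, h, hg⟩
  · rintro (h | ⟨y, hy, hg⟩)
    · exact ⟨x, List.mem_cons_self, h⟩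
    · exact ⟨y, List.mem_cons_of_mem _ hy, hg⟩

lemma esdGroupsFor_spec (p2g : PySem.Dict Int Int) (ids : List Int) (s : PySem.Set Int) (g : Int) :
    g ∈ ids.foldl (fun s x =>
      match p2g.get? x with
      | some g => PySem.Set.add s g
      | none => s) s ↔ g ∈ s ∨ esdGF p2g ids g := by
  induction ids generalizing s with
  | nil => simp [esdGF_nil]
  | cons x rest ih =>
    simp only [List.foldl_cons]
    cases hx : p2g.get? x with
    | none => simp [ih, esdGF_cons, hx]
    | some gx =>
      rw [ih]
      simp [PySem.Set.mem_add, esdGF_cons, hx]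
      constructor
      · rintro ((h | rfl) | h)
        · exact Or.inl h
        · exact Or.inr (Or.inl rfl)
        · exact Or.inr (Or.inr h)
      · rintro (h | (rfl | h))
        · exact Or.inl (Or.inl h)
        · exact Or.inl (Or.inr rfl)
        · exact Or.inr h

lemma esdGroupsFor_mem (p2g : PySem.Dict Int Int) (ids : List Int) (g : Int) :
    g ∈ esdGroupsFor p2g ids ↔ esdGF p2g ids g := by
  unfold esdGroupsFor
  rw [esdGroupsFor_spec]
  simp [PySem.Set.empty]

-- full characterisation of one scan: when it fails, and the resulting dict
lemma esdScan_spec (p2g : PySem.Dict Int Int) (side : String) (ids : List Int)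
    (first : PySem.Dict Int String) :
    (esdScan p2g side ids first = none ↔
      ∃ g, esdGF p2g ids g ∧ ∃ s, first.get? g = some s ∧ s ≠ side) ∧
    (∀ d, esdScan p2g side ids first = some d →
      ∀ g v, d.get? g = some v ↔
        (first.get? g = some v ∨ (first.get? g = none ∧ v = side ∧ esdGF p2g ids g))) := by
  induction ids generalizing first with
  | nil =>
    constructor
    · simp only [esdScan]
      constructor
      · intro h; cases h
      · rintro ⟨g, hg, _⟩; exact absurd hg (esdGF_nil p2g g)
    · intro d hd g v
      simp only [esdScan, Option.some.injEq] at hd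
      subst hd
      simp [esdGF_nil p2g g]
  | cons x rest ih =>
    cases hx : p2g.get? x with
    | none =>
      have h1 := (ih first).1
      have h2 := (ih first).2
      constructor
      · simp only [esdScan, hx]; rw [h1]
        constructor
        · rintro ⟨g, hg, hs⟩; exact ⟨g, (esdGF_cons p2g x rest g).mpr (Or.inr hg), hs⟩
        · rintro ⟨g, hg, hs⟩
          rcases (esdGF_cons p2g x rest g).mp hg with h | h
          · rw [hx] at h; cases h
          · exact ⟨g, h, hs⟩
      · intro d hd g v
        simp only [esdScan, hx] at hd
        rw [h2 d hd g v, esdGF_cons, hx]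
        simp
    | some gx =>
      cases hfx : first.get? gx with
      | none =>
        have h1 := (ih (first.insert gx side)).1
        have h2 := (ih (first.insert gx side)).2
        constructor
        · simp only [esdScan, hx, hfx]; rw [h1]
          constructor
          · rintro ⟨g, hg, s, hs, hne⟩
            rw [PySem.Dict.get?_insert] at hs
            by_cases hgg : g = gx
            · subst hgg; simp at hs; exact absurd hs.symm hne
            · rw [if_neg hgg] at hs
              exact ⟨g, (esdGF_cons p2g x rest g).mpr (Or.inr hg), s, hs, hne⟩
          · rintro ⟨g, hg, s, hs, hne⟩
            have hgg : g ≠ gx := by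
              rintro rfl; rw [hfx] at hs; cases hs
            rcases (esdGF_cons p2g x rest g).mp hg with h | h
            · rw [hx] at h; exact absurd (Option.some_injective _ h).symm hgg
            · exact ⟨g, h, s, by rw [PySem.Dict.get?_insert, if_neg hgg]; exact hs, hne⟩
        · intro d hd g v
          simp only [esdScan, hx, hfx] at hd
          rw [h2 d hd g v, esdGF_cons, hx, PySem.Dict.get?_insert]
          by_cases hgg : g = gx
          · subst hgg; simp [hfx, eq_comm]
          · rw [if_neg hgg]; simp [Ne.symm hgg]
      | some prev =>
        by_cases hps : prev = side
        · subst hps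
          have h1 := (ih first).1
          have h2 := (ih first).2
          constructor
          · simp only [esdScan, hx, hfx]; rw [if_neg (by simp), h1]
            constructor
            · rintro ⟨g, hg, hs⟩
              exact ⟨g, (esdGF_cons p2g x rest g).mpr (Or.inr hg), hs⟩
            · rintro ⟨g, hg, s, hs, hne⟩
              rcases (esdGF_cons p2g x rest g).mp hg with h | h
              · rw [hx, Option.some.injEq] at h
                subst h
                rw [hfx, Option.some.injEq] at hs
                exact absurd hs.symm hne
              · exact ⟨g, h, s, hs, hne⟩
          · intro d hd g v
            simp only [esdScan, hx, hfx] at hd; rw [if_neg (by simp)] at hd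
            rw [h2 d hd g v, esdGF_cons, hx]
            by_cases hgg : gx = g
            · subst hgg; simp [hfx]
            · simp [hgg]
        · constructor
          · simp only [esdScan, hx, hfx]; rw [if_pos hps]
            constructor
            · intro _
              exact ⟨gx, (esdGF_cons p2g x rest gx).mpr (Or.inl hx), prev, hfx, hps⟩
            · intro _; rfl
          · intro d hd
            simp only [esdScan, hx, hfx] at hd; rw [if_pos hps] at hd
            cases hd

-- ===== VERDICT (by name: the statement is the Claim_ definition above) =====
theorem enforce_strong_disjoint_spec : Claim_equal_enforce_strong_disjoint := by
  intro train_ids calib_ids test_ids part_to_group _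
  unfold Spec_enforce_strong_disjoint
  set p2g := PySem.Dict.ofList part_to_group with hp
  rw [Bool.eq_iff_iff]
  -- empty intersection of two group sets, as a proposition
  have hA : ∀ (u v : List Int),
      (PySem.Set.inter (esdGroupsFor p2g u) (esdGroupsFor p2g v)).isEmpty = true ↔
      ¬ ∃ g, esdGF p2g u g ∧ esdGF p2g v g := by
    intro u v
    rw [List.isEmpty_iff, List.eq_nil_iff_forall_not_mem]
    constructor
    · rintro h ⟨g, h1, h2⟩
      exact h g ((PySem.Set.mem_inter _ _ _).mpr
        ⟨(esdGroupsFor_mem p2g u g).mpr h1, (esdGroupsFor_mem p2g v g).mpr h2⟩)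
    · intro h g hg
      rcases (PySem.Set.mem_inter _ _ _).mp hg with ⟨h1, h2⟩
      exact h ⟨g, (esdGroupsFor_mem p2g u g).mp h1, (esdGroupsFor_mem p2g v g).mp h2⟩
  have hAiff : enforce_strong_disjoint train_ids calib_ids test_ids part_to_group = true ↔
      (¬ ∃ g, esdGF p2g train_ids g ∧ esdGF p2g calib_ids g) ∧
      (¬ ∃ g, esdGF p2g train_ids g ∧ esdGF p2g test_ids g) ∧
      (¬ ∃ g, esdGF p2g calib_ids g ∧ esdGF p2g test_ids g) := by
    simp only [enforce_strong_disjoint, ← hp]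
    split_ifs with hcond
    · simp only [false_iff]
      rintro ⟨h1, h2, h3⟩
      simp only [Bool.or_eq_true, Bool.not_eq_true'] at hcond
      rcases hcond with (h | h) | h
      · exact absurd ((hA train_ids calib_ids).mpr h1) (by simp [h])
      · exact absurd ((hA train_ids test_ids).mpr h2) (by simp [h])
      · exact absurd ((hA calib_ids test_ids).mpr h3) (by simp [h])
    · simp only [true_iff]
      simp only [Bool.or_eq_true, Bool.not_eq_true', not_or, Bool.not_eq_false] at hcond
      exact ⟨(hA train_ids calib_ids).mp hcond.1.1, (hA train_ids test_ids).mp hcond.1.2,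
        (hA calib_ids test_ids).mp hcond.2⟩
  rw [hAiff]
  have hST := esdScan_spec p2g "train" train_ids PySem.Dict.empty
  cases hT : esdScan p2g "train" train_ids PySem.Dict.empty with
  | none =>
    rcases hST.1.mp hT with ⟨g, _, s, hs, _⟩
    rw [PySem.Dict.get?_empty] at hs
    cases hs
  | some d1 =>
    have hd1 : ∀ g v, d1.get? g = some v ↔ (v = "train" ∧ esdGF p2g train_ids g) := by
      intro g v
      rw [hST.2 d1 hT g v]
      simp [PySem.Dict.get?_empty]
    have hd1none : ∀ g, d1.get? g = none ↔ ¬ esdGF p2g train_ids g := by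
      intro g
      constructor
      · intro hn hGF
        have := (hd1 g "train").mpr ⟨rfl, hGF⟩
        rw [hn] at this; cases this
      · intro hnot
        cases h : d1.get? g with
        | none => rfl
        | some v => exact absurd ((hd1 g v).mp h).2 hnot
    have hSC := esdScan_spec p2g "calib" calib_ids d1
    cases hC : esdScan p2g "calib" calib_ids d1 with
    | none =>
      have hB : enforce_strong_disjoint_alt train_ids calib_ids test_ids part_to_group = false := by
        simp only [enforce_strong_disjoint_alt, ← hp, hT, hC]
      rw [hB]
      rcases hSC.1.mp hC with ⟨g, hgc, s, hs, _⟩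
      rcases (hd1 g s).mp hs with ⟨rfl, hgt⟩
      refine iff_of_false ?_ (by simp)
      rintro ⟨h1, _, _⟩
      exact h1 ⟨g, hgt, hgc⟩
    | some d2 =>
      have hd2 : ∀ g v, d2.get? g = some v ↔
          ((v = "train" ∧ esdGF p2g train_ids g) ∨
           (¬ esdGF p2g train_ids g ∧ v = "calib" ∧ esdGF p2g calib_ids g)) := by
        intro g v
        rw [hSC.2 d2 hC g v, hd1, hd1none]
      have hSTe := esdScan_spec p2g "test" test_ids d2
      cases hTe : esdScan p2g "test" test_ids d2 with
      | none =>
        have hB : enforce_strong_disjoint_alt train_ids calib_ids test_ids part_to_group = false := by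
          simp only [enforce_strong_disjoint_alt, ← hp, hT, hC, hTe]
        rw [hB]
        rcases hSTe.1.mp hTe with ⟨g, hgte, s, hs, _⟩
        rcases (hd2 g s).mp hs with ⟨rfl, hgt⟩ | ⟨_, rfl, hgc⟩
        · refine iff_of_false ?_ (by simp)
          rintro ⟨_, h2, _⟩; exact h2 ⟨g, hgt, hgte⟩
        · refine iff_of_false ?_ (by simp)
          rintro ⟨_, _, h3⟩; exact h3 ⟨g, hgc, hgte⟩
      | some d3 =>
        have hB : enforce_strong_disjoint_alt train_ids calib_ids test_ids part_to_group = true := by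
          simp only [enforce_strong_disjoint_alt, ← hp, hT, hC, hTe]
        rw [hB]
        refine iff_of_true ⟨?_, ?_, ?_⟩ rfl
        · rintro ⟨g, hgt, hgc⟩
          have : esdScan p2g "calib" calib_ids d1 = none :=
            hSC.1.mpr ⟨g, hgc, "train", (hd1 g "train").mpr ⟨rfl, hgt⟩, by decide⟩
          rw [hC] at this; cases this
        · rintro ⟨g, hgt, hgte⟩
          have : esdScan p2g "test" test_ids d2 = none :=
            hSTe.1.mpr ⟨g, hgte, "train", (hd2 g "train").mpr (Or.inl ⟨rfl, hgt⟩), by decide⟩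
          rw [hTe] at this; cases this
        · rintro ⟨g, hgc, hgte⟩
          by_cases hgt : esdGF p2g train_ids g
          · have : esdScan p2g "test" test_ids d2 = none :=
              hSTe.1.mpr ⟨g, hgte, "train", (hd2 g "train").mpr (Or.inl ⟨rfl, hgt⟩), by decide⟩
            rw [hTe] at this; cases this
          · have : esdScan p2g "test" test_ids d2 = none :=
              hSTe.1.mpr ⟨g, hgte, "calib", (hd2 g "calib").mpr (Or.inr ⟨hgt, rfl, hgc⟩), by decide⟩
            rw [hTe] at this; cases this
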